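-- pv_equiv track=rewrite | github.com/paulkugener/adventofcode | 2015/11.py | _has_multiple_pairs
-- ===== SOURCE A (Python) =====
-- def _has_multiple_pairs(in_str):
--     pair_counter = 0
--     pair_letters = []
--     i = 0
--     for i in range(0, len(in_str)-1):
--         if in_str[i] == in_str[i+1] and in_str[i] not in pair_letters:
--             pair_counter += 1
--             pair_letters.append(in_str[i])
--     if pair_counter >= 2:
--         return True
--     return False
-- ===== SOURCE B (Python) =====
-- def _has_multiple_pairs(in_str):
--     count = 0
--     for c in set(in_str):
--         if c + c in in_str:
--             count += 1
--     return count >= 2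
-- ===== Notes on version B (the rewrite author's own statement) =====
-- stated objective: alternative
-- what changed: Replaces A's positional scan over adjacent index pairs with its dedup-list membership test by a per-distinct-character substring test: count the distinct characters c such that c+c occurs in the string, return whether that count is >= 2.
import Mathlib
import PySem

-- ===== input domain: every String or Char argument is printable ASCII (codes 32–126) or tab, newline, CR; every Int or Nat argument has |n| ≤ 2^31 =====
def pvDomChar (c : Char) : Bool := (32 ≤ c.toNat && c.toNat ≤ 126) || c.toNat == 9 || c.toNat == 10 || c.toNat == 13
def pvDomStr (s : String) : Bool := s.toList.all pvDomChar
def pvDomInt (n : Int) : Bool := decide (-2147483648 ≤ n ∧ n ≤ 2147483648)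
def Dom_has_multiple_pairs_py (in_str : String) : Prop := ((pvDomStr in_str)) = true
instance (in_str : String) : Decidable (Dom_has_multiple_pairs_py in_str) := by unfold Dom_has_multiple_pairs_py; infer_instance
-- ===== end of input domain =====

-- B replaces A's positional adjacent-index scan with a per-distinct-character
-- substring test (count distinct c with c+c occurring in the string); alternative decomposition, same result.


-- ===== PORT A =====
-- transliteration of A: for i in range(0, len-1): if s[i]==s[i+1] and s[i] not in pair_letters: …
-- (indices from the range are always in bounds, so s[i] is PySem.List.pyGetD with an irrelevant default)
def has_multiple_pairs_py (in_str : String) : Bool :=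
  let l := in_str.toList
  let st :=
    (PySem.List.pyRange 0 (PySem.Str.len in_str - 1) 1).foldl
      (fun (st : Int × List Char) i =>
        if PySem.List.pyGetD l i ' ' == PySem.List.pyGetD l (i + 1) ' ' &&
           !(st.2.contains (PySem.List.pyGetD l i ' ')) then
          (st.1 + 1, st.2 ++ [PySem.List.pyGetD l i ' '])
        else st)
      ((0 : Int), ([] : List Char))
  if st.1 ≥ 2 then true else false

-- ===== PORT B =====
-- transliteration of B: count = 0; for c in set(in_str): if c+c in in_str: count += 1; return count >= 2
def has_multiple_pairs_py_alt (in_str : String) : Bool :=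
  let count :=
    (PySem.Set.ofList in_str.toList).foldl
      (fun (count : Int) c =>
        if PySem.Chars.isIn [c, c] in_str.toList then count + 1 else count)
      (0 : Int)
  decide (count ≥ 2)

-- ===== PRECONDITION & SPEC =====
def Spec_has_multiple_pairs_py (in_str : String) (out : Bool) : Prop := out = has_multiple_pairs_py_alt in_str
instance (in_str : String) (out : Bool) : Decidable (Spec_has_multiple_pairs_py in_str out) := by unfold Spec_has_multiple_pairs_py; infer_instance

-- ===== CLAIM (what is proved, stated in full; the proofs are below) =====
def Claim_equal_has_multiple_pairs_py : Prop := ∀ (in_str : String), Dom_has_multiple_pairs_py in_str → Spec_has_multiple_pairs_py in_str (has_multiple_pairs_py in_str)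

-- ===== LEMMAS AND PROOFS =====

-- a length-2 list is an infix iff it occurs at some pair of adjacent positions
theorem infix_pair_iff {α : Type} (x y : α) (l : List α) :
    [x, y] <:+: l ↔ ∃ i : Nat, l[i]? = some x ∧ l[i + 1]? = some y := by
  induction l with
  | nil =>
    simp only [List.infix_nil, List.getElem?_nil]
    constructor
    · intro h; cases h
    · rintro ⟨i, h, -⟩; cases h
  | cons c t ih =>
    rw [List.infix_cons_iff]
    constructor
    · rintro (hpre | hinf)
      · rcases hpre with ⟨s, hs⟩
        cases t with
        | nil => simp at hs
        | cons y' t' =>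
          exact ⟨0, by simp_all, by simp_all⟩
      · rcases ih.1 hinf with ⟨i, h1, h2⟩
        exact ⟨i + 1, by simpa using h1, by simpa using h2⟩
    · rintro ⟨i, h1, h2⟩
      cases i with
      | zero =>
        left
        simp only [List.getElem?_cons_zero, Option.some.injEq] at h1
        cases t with
        | nil => simp at h2
        | cons y' t' =>
          simp only [List.getElem?_cons_succ, List.getElem?_cons_zero, Option.some.injEq] at h2
          subst h1; subst h2
          exact ⟨t', rfl⟩
      | succ j =>
        right
        exact ih.2 ⟨j, by simpa using h1, by simpa using h2⟩

-- proof-side names for A's loop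
def pvStep (l : List Char) (st : Int × List Char) (i : Int) : Int × List Char :=
  if PySem.List.pyGetD l i ' ' == PySem.List.pyGetD l (i + 1) ' ' &&
     !(st.2.contains (PySem.List.pyGetD l i ' ')) then
    (st.1 + 1, st.2 ++ [PySem.List.pyGetD l i ' '])
  else st

def pvLoop (l : List Char) (m : Nat) : Int × List Char :=
  (PySem.List.pyRange 0 (m : Int) 1).foldl (pvStep l) ((0 : Int), ([] : List Char))

-- invariant of A's loop: counter = |letters|, letters distinct, a ∈ letters ↔ a sits at an
-- adjacent equal pair among positions < m
theorem loopA_inv (l : List Char) (m : Nat) (hm : m + 1 ≤ l.length) :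
    (pvLoop l m).1 = ((pvLoop l m).2.length : Int) ∧ (pvLoop l m).2.Nodup ∧
      ∀ a, a ∈ (pvLoop l m).2 ↔ ∃ i : Nat, i < m ∧ l[i]? = some a ∧ l[i + 1]? = some a := by
  induction m with
  | zero =>
    simp [pvLoop]
  | succ m ih =>
    obtain ⟨ih1, ih2, ih3⟩ := ih (by omega)
    have hsplit : pvLoop l (m + 1) = pvStep l (pvLoop l m) (m : Int) := by
      rw [pvLoop, pvLoop, show ((m + 1 : Nat) : Int) = (m : Int) + 1 by push_cast; ring,
          PySem.List.pyRange_one_succ_right (by positivity), List.foldl_append]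
      rfl
    have hget : PySem.List.pyGetD l (m : Int) ' ' = l[m]'(by omega) := by
      rw [PySem.List.pyGetD_natCast]
      exact List.getD_eq_getElem l ' ' (by omega)
    have hget1 : PySem.List.pyGetD l ((m : Int) + 1) ' ' = l[m + 1]'(by omega) := by
      rw [show ((m : Int) + 1) = ((m + 1 : Nat) : Int) by push_cast; ring, PySem.List.pyGetD_natCast]
      exact List.getD_eq_getElem l ' ' (by omega)
    rw [hsplit, pvStep, hget, hget1]
    have hgm : m < l.length := by omega
    have hgm1 : m + 1 < l.length := by omega
    have hsome : l[m]? = some (l[m]'hgm) := List.getElem?_eq_getElem hgm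
    have hsome1 : l[m + 1]? = some (l[m + 1]'hgm1) := List.getElem?_eq_getElem hgm1
    by_cases hc : (l[m]'hgm == l[m + 1]'hgm1 && !(pvLoop l m).2.contains (l[m]'hgm)) = true
    · -- a new pair letter is appended
      have heq : l[m]'hgm = l[m + 1]'hgm1 := by
        simp only [Bool.and_eq_true, beq_iff_eq] at hc; exact hc.1
      have hmem : (l[m]'hgm) ∉ (pvLoop l m).2 := by
        simp only [Bool.and_eq_true, Bool.not_eq_true', List.contains_eq_mem,
          decide_eq_false_iff_not] at hc
        exact hc.2
      rw [if_pos hc]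
      refine ⟨by simp [ih1], ih2.append (List.nodup_singleton _) (List.disjoint_singleton.2 hmem), fun a => ?_⟩
      simp only [List.mem_append, List.mem_singleton, ih3 a]
      constructor
      · rintro (⟨i, hi, h1, h2⟩ | rfl)
        · exact ⟨i, by omega, h1, h2⟩
        · exact ⟨m, by omega, hsome, by rw [hsome1, heq]⟩
      · rintro ⟨i, hi, h1, h2⟩
        rcases Nat.lt_or_ge i m with hlt | hge
        · exact Or.inl ⟨i, hlt, h1, h2⟩
        · rw [show i = m from by omega] at h1
          right
          rw [hsome] at h1
          exact (Option.some.injEq _ _ ▸ h1).symm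
    · -- no change to the state
      rw [if_neg hc]
      refine ⟨ih1, ih2, fun a => ?_⟩
      rw [ih3 a]
      constructor
      · rintro ⟨i, hi, h1, h2⟩; exact ⟨i, by omega, h1, h2⟩
      · rintro ⟨i, hi, h1, h2⟩
        rcases Nat.lt_or_ge i m with hlt | hge
        · exact ⟨i, hlt, h1, h2⟩
        · rw [show i = m from by omega] at h1
          rw [show i = m from by omega] at h2
          have e1 : a = l[m]'hgm := by rw [hsome] at h1; exact (Option.some.injEq _ _ ▸ h1).symm
          have e2 : a = l[m + 1]'hgm1 := by rw [hsome1] at h2; exact (Option.some.injEq _ _ ▸ h2).symm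
          have heq : l[m]'hgm = l[m + 1]'hgm1 := by rw [← e1, ← e2]
          have hcontains : (l[m]'hgm) ∈ (pvLoop l m).2 := by
            by_contra hmem
            have hbeq : (l[m]'hgm == l[m + 1]'hgm1) = true := by simp [heq]
            exact hc (by simp [hbeq, List.contains_eq_mem, hmem])
          obtain ⟨j, hj, g1, g2⟩ := (ih3 _).1 hcontains
          exact ⟨j, hj, by rw [e1]; exact g1, by rw [e1]; exact g2⟩

-- A's loop, expressed through the named loop (the range bound ↑len - 1 is ↑(len - 1))
theorem portA_state (s : String) :
    (PySem.List.pyRange 0 (PySem.Str.len s - 1) 1).foldl (pvStep s.toList)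
      ((0 : Int), ([] : List Char)) = pvLoop s.toList (s.toList.length - 1) := by
  rw [pvLoop, PySem.Str.len_eq]
  obtain hz | ⟨n, hn⟩ : s.toList.length = 0 ∨ ∃ n, s.toList.length = n + 1 := by
    cases s.toList.length with
    | zero => exact Or.inl rfl
    | succ n => exact Or.inr ⟨n, rfl⟩
  · rw [hz, show ((0 : Nat) : Int) - 1 = -1 from by norm_num,
        PySem.List.pyRange_one_eq_nil (by norm_num),
        show ((0 - 1 : Nat) : Int) = 0 from by norm_num,
        PySem.List.pyRange_one_eq_nil (by norm_num)]
  · rw [hn, show ((n + 1 : Nat) : Int) - 1 = ((n : Nat) : Int) from by push_cast; ring,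
        show (n + 1 - 1 : Nat) = n from by omega]

-- B's per-character test agrees with "a sits at an adjacent equal pair"
theorem memB_iff (l : List Char) (a : Char) :
    a ∈ (PySem.List.dedup l).filter (fun c => PySem.Chars.isIn [c, c] l) ↔ [a, a] <:+: l := by
  rw [List.mem_filter, PySem.List.mem_dedup, PySem.Chars.isIn_iff_infix]
  constructor
  · exact fun h => h.2
  · exact fun h => ⟨h.subset (by simp), h⟩

-- ===== VERDICT (by name: the statement is the Claim_ definition above) =====
theorem has_multiple_pairs_py_spec : Claim_equal_has_multiple_pairs_py := by
  intro s _
  unfold Spec_has_multiple_pairs_py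
  rw [show has_multiple_pairs_py s =
        (if ((PySem.List.pyRange 0 (PySem.Str.len s - 1) 1).foldl (pvStep s.toList)
              ((0 : Int), ([] : List Char))).1 ≥ 2 then true else false) from rfl,
      portA_state]
  unfold has_multiple_pairs_py_alt
  rw [← PySem.List.dedup_eq_ofList, PySem.List.foldl_if_add_one, zero_add,
      List.countP_eq_length_filter]
  cases hn : s.toList.length with
  | zero =>
    rw [List.length_eq_zero_iff.1 hn]
    decide
  | succ n =>
    obtain ⟨h1, h2, h3⟩ := loopA_inv s.toList n (by omega)
    have hmemA : ∀ a, a ∈ (pvLoop s.toList n).2 ↔ [a, a] <:+: s.toList := by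
      intro a
      rw [h3 a, infix_pair_iff]
      constructor
      · rintro ⟨i, -, g1, g2⟩; exact ⟨i, g1, g2⟩
      · rintro ⟨i, g1, g2⟩
        have : i + 1 < s.toList.length := (List.getElem?_eq_some_iff.1 g2).1
        exact ⟨i, by omega, g1, g2⟩
    have hperm : (pvLoop s.toList n).2.Perm
        ((PySem.List.dedup s.toList).filter (fun c => PySem.Chars.isIn [c, c] s.toList)) :=
      (List.perm_ext_iff_of_nodup h2 ((PySem.List.nodup_dedup s.toList).filter _)).2
        (fun a => by rw [hmemA a, memB_iff])
    rw [show n + 1 - 1 = n from rfl, h1, hperm.length_eq]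
    simp [ge_iff_le]
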